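-- pv_equiv track=rewrite | github.com/m4nuC/Algorithms-Data-Structures | Kosaraju/kosaraju.py | dfs
-- ===== SOURCE A (Python) =====
-- def dfs(G, start, explored):
--     explored.add(start)
--     SCC = []
--     for vertex in G[start][1]:
--         if vertex not in explored:
--             SCC.append(vertex)
--             dfs(G, vertex, explored)
--     return SCC
-- ===== SOURCE B (Python) =====
-- def dfs(G, start, explored):
--     # Iterative re-implementation: the recursive subtree walk is replaced by an
--     # explicit-stack worklist that marks the same reachable set before the outer
--     # loop advances.  Same return value; `explored` is mutated in place like A
--     # (same final set of marks).
--     explored.add(start)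
--     SCC = []
--     for vertex in G[start][1]:
--         if vertex not in explored:
--             SCC.append(vertex)
--             stack = [vertex]
--             while stack:
--                 v = stack.pop()
--                 if v not in explored:
--                     explored.add(v)
--                     stack.extend(reversed(G[v][1]))
--     return SCC
-- ===== Notes on version B (the rewrite author's own statement) =====
-- stated objective: alternative
-- what changed: The recursive subtree exploration is replaced by an explicit-stack worklist loop that marks the same reachable set iteratively before the outer loop advances; the return value is identical.
import Mathlib
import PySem

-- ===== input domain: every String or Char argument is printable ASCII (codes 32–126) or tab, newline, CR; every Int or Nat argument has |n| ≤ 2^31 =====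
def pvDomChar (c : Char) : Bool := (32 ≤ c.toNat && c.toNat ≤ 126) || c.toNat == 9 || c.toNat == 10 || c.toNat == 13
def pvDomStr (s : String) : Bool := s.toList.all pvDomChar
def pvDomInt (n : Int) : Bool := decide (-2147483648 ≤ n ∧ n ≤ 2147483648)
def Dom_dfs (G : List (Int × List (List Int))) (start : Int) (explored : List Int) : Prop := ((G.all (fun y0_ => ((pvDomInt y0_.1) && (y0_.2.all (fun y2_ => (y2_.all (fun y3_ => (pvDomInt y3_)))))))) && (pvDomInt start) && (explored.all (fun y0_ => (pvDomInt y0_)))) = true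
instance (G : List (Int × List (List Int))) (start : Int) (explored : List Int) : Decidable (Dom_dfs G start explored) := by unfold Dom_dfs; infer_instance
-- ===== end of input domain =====

-- B replaces the recursive subtree walk by an explicit-stack worklist loop (alternative
-- decomposition, same cost).  Both Pythons mutate `explored` in place (same final set of
-- marks); the equivalence proved here is about the RETURN value.

-- Shared lookup helper: G[v][1] made total.  Python raises KeyError (v not a key) or
-- IndexError (value shorter than 2) there — such inputs are excluded by Pre_dfs; the
-- ports continue with no neighbours.
def nbrsOf (G : List (Int × List (List Int))) (v : Int) : List Int :=
  match (PySem.Dict.mk G).get? v with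
  | some val =>
    match PySem.List.pyGet? val 1 with
    | some l => l
    | none => []
  | none => []

-- ===== PORT A =====
-- the `for vertex in G[start][1]` loop; `rec` is the recursive call `dfs(G, vertex, explored)`
def dfsALoop (rec : Int → List Int → List Int × List Int) :
    List Int → List Int → List Int → List Int × List Int
  | [], scc, explored => (scc, explored)
  | v :: vs, scc, explored =>
    if v ∈ explored then dfsALoop rec vs scc explored
    else dfsALoop rec vs (scc ++ [v]) (rec v explored).2

-- recursive A, returning (SCC, explored); fuel only for totality
-- (the recursion depth is at most the number of keys plus one)
def dfsA (G : List (Int × List (List Int))) : Nat → Int → List Int → List Int × List Int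
  | 0, _, explored => ([], explored)
  | f + 1, start, explored =>
    let explored := PySem.Set.add explored start
    dfsALoop (dfsA G f) (nbrsOf G start) [] explored

def dfs (G : List (Int × List (List Int))) (start : Int) (explored : List Int) : List Int :=
  (dfsA G (G.length + 2) start explored).1

-- ===== PORT B =====
-- fuel bound for the while loop (totality only): max neighbour-list length
def maxNbrLen (G : List (Int × List (List Int))) : Nat :=
  G.foldl (fun m p => max m (nbrsOf G p.1).length) 0

-- the `while stack:` loop; stack represented top-first (Python's list has its top at the
-- end and pushes `reversed(G[v][1])`, so pop = head and push = prepend `G[v][1]` here)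
def markB (G : List (Int × List (List Int))) : Nat → List Int → List Int → List Int
  | 0, explored, _ => explored
  | _ + 1, explored, [] => explored
  | f + 1, explored, v :: stack =>
    if v ∈ explored then markB G f explored stack
    else markB G f (PySem.Set.add explored v) (nbrsOf G v ++ stack)

-- the outer `for vertex in G[start][1]` loop of B
def dfsBLoop (G : List (Int × List (List Int))) (fuel : Nat) :
    List Int → List Int → List Int → List Int × List Int
  | [], scc, explored => (scc, explored)
  | v :: vs, scc, explored =>
    if v ∈ explored then dfsBLoop G fuel vs scc explored
    else dfsBLoop G fuel vs (scc ++ [v]) (markB G fuel explored [v])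

def dfs_alt (G : List (Int × List (List Int))) (start : Int) (explored : List Int) : List Int :=
  let explored := PySem.Set.add explored start
  (dfsBLoop G (G.length * (maxNbrLen G + 1) + 1) (nbrsOf G start) [] explored).1

-- ===== PRECONDITION & SPEC =====
-- `wellFormed G v`: looking up G[v][1] does not raise (v is a key whose value has ≥ 2 items)
def wellFormed (G : List (Int × List (List Int))) (v : Int) : Bool :=
  match (PySem.Dict.mk G).get? v with
  | some val => 2 ≤ val.length
  | none => false

-- one closure step: add the neighbours of every not-avoided vertex of S
def reachStep (G : List (Int × List (List Int))) (avoid : List Int) (S : List Int) : List Int :=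
  (S.flatMap (fun v => if v ∈ avoid then [] else nbrsOf G v)).foldl PySem.Set.add S

-- all vertices A's walk can encounter: neighbours of start, closed under expansion of
-- vertices outside start :: explored (|G| + 1 steps reach the fixpoint)
def reachSet (G : List (Int × List (List Int))) (avoid : List Int) (start : Int) : List Int :=
  (reachStep G avoid)^[G.length + 1] (nbrsOf G start)

-- Pre_dfs is exactly the set of inputs on which the Python A returns (no KeyError /
-- IndexError): start's own entry is well-formed, and every vertex the walk can encounter
-- is either never expanded (already in explored, or start itself) or well-formed.
def Pre_dfs (G : List (Int × List (List Int))) (start : Int) (explored : List Int) : Prop :=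
  wellFormed G start = true ∧
    ∀ v ∈ reachSet G (start :: explored) start, v ∈ start :: explored ∨ wellFormed G v = true

instance (G : List (Int × List (List Int))) (start : Int) (explored : List Int) : Decidable (Pre_dfs G start explored) := by unfold Pre_dfs; infer_instance

def pvWitness_dfs : (List (Int × List (List Int))) × Int × List Int :=
  ([(0, [[], [1, 2]]), (1, [[], [2]]), (2, [[], [0]])], 0, [])

def Spec_dfs (G : List (Int × List (List Int))) (start : Int) (explored : List Int) (out : List Int) : Prop := out = dfs_alt G start explored
instance (G : List (Int × List (List Int))) (start : Int) (explored : List Int) (out : List Int) : Decidable (Spec_dfs G start explored out) := by unfold Spec_dfs; infer_instance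

-- ===== CLAIM (what is proved, stated in full; the proofs are below) =====
def Claim_equal_dfs : Prop := ∀ (G : List (Int × List (List Int))) (start : Int) (explored : List Int), Dom_dfs G start explored → Pre_dfs G start explored → Spec_dfs G start explored (dfs G start explored)

-- ===== LEMMAS AND PROOFS =====
-- The two ports are in fact proved equal on ALL inputs (ports_equal below): the fuel
-- values are sufficient unconditionally, so the Pre_dfs hypothesis is not needed by the
-- proof; it delimits where the ports are faithful to the raising Python originals.

-- finite universe for the termination measure of `ideal`: keys and all neighbour values
def UF (G : List (Int × List (List Int))) : Finset Int :=
  (G.map Prod.fst).toFinset ∪ (G.flatMap (fun p => nbrsOf G p.1)).toFinset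

-- number of KEYS not yet explored (only keys can be expanded)
def cnt (G : List (Int × List (List Int))) (e : List Int) : Nat :=
  (((G.map Prod.fst).toFinset).filter (fun k => k ∉ e)).card

theorem get?_mk_mem (G : List (Int × List (List Int))) (v : Int) (val : List (List Int))
    (h : (PySem.Dict.mk G).get? v = some val) : (v, val) ∈ G := by
  induction G with
  | nil => simp [PySem.Dict.get?] at h
  | cons p G ih =>
    rcases p with ⟨k, w⟩
    rw [PySem.Dict.get?_mk_cons] at h
    by_cases hk : k = v
    · subst hk; simp at h; subst h; exact List.mem_cons_self
    · simp [hk] at h; exact List.mem_cons_of_mem _ (ih h)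

theorem mem_keys_of_get? (G : List (Int × List (List Int))) (v : Int) (val : List (List Int))
    (h : (PySem.Dict.mk G).get? v = some val) : v ∈ (G.map Prod.fst).toFinset := by
  simp only [List.mem_toFinset, List.mem_map]
  exact ⟨(v, val), get?_mk_mem G v val h, rfl⟩

theorem nbrsOf_of_none (G : List (Int × List (List Int))) (v : Int)
    (h : (PySem.Dict.mk G).get? v = none) : nbrsOf G v = [] := by
  unfold nbrsOf; rw [h]

theorem nbrsOf_mem_UF (G : List (Int × List (List Int))) (v w : Int)
    (h : w ∈ nbrsOf G v) : w ∈ UF G := by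
  unfold nbrsOf at h
  rcases hg : (PySem.Dict.mk G).get? v with _ | val
  · rw [hg] at h; simp at h
  · have hmem := get?_mk_mem G v val hg
    unfold UF
    simp only [Finset.mem_union, List.mem_toFinset, List.mem_flatMap]
    right
    refine ⟨(v, val), hmem, ?_⟩
    unfold nbrsOf
    rw [hg]; rw [hg] at h; exact h

theorem foldl_max_init_le (l : List (Int × List (List Int))) (f : (Int × List (List Int)) → Nat) (a : Nat) :
    a ≤ l.foldl (fun m p => max m (f p)) a := by
  induction l generalizing a with
  | nil => simp
  | cons hd tl ih => exact le_trans (le_max_left a (f hd)) (ih _)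

theorem foldl_max_mem_le (l : List (Int × List (List Int))) (f : (Int × List (List Int)) → Nat)
    (a : Nat) (x : Int × List (List Int)) (hx : x ∈ l) :
    f x ≤ l.foldl (fun m p => max m (f p)) a := by
  induction l generalizing a with
  | nil => simp at hx
  | cons hd tl ih =>
    rcases List.mem_cons.1 hx with h | h
    · subst h; exact le_trans (le_max_right a (f x)) (foldl_max_init_le tl f _)
    · exact ih _ h

theorem nbrsOf_len_le (G : List (Int × List (List Int))) (v : Int) :
    (nbrsOf G v).length ≤ maxNbrLen G := by
  rcases hg : (PySem.Dict.mk G).get? v with _ | val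
  · unfold nbrsOf; rw [hg]; simp
  · have hmem := get?_mk_mem G v val hg
    unfold maxNbrLen
    simpa using foldl_max_mem_le G (fun p => (nbrsOf G p.1).length) 0 (v, val) hmem

-- reference function: fuel-free explicit-stack marking (well-founded on the measure
-- (unexplored universe elements, stack length))
def ideal (G : List (Int × List (List Int))) : List Int → List Int → List Int
  | e, [] => e
  | e, v :: s =>
    if v ∈ e then ideal G e s
    else ideal G (PySem.Set.add e v) (nbrsOf G v ++ s)
  termination_by e s => (((UF G ∪ s.toFinset) \ e.toFinset).card, s.length)
  decreasing_by
  · have hsub : (UF G ∪ s.toFinset) \ e.toFinset ⊆ (UF G ∪ (v :: s).toFinset) \ e.toFinset := by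
      intro x hx
      simp only [Finset.mem_sdiff, Finset.mem_union, List.mem_toFinset, List.mem_cons] at *
      tauto
    rcases lt_or_eq_of_le (Finset.card_le_card hsub) with h | h
    · exact Prod.Lex.left _ _ h
    · rw [h]; exact Prod.Lex.right _ (by simp)
  · rename_i hv
    apply Prod.Lex.left
    apply Finset.card_lt_card
    constructor
    · intro x hx
      simp only [Finset.mem_sdiff, Finset.mem_union, List.mem_toFinset, List.mem_append,
        List.mem_cons, PySem.Set.mem_add] at *
      have : x ∈ nbrsOf G v → x ∈ UF G := nbrsOf_mem_UF G v x
      tauto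
    · intro hcon
      have hvmem : v ∈ (UF G ∪ (v :: s).toFinset) \ e.toFinset := by
        simp only [Finset.mem_sdiff, Finset.mem_union, List.mem_toFinset, List.mem_cons]
        tauto
      have := hcon hvmem
      simp only [Finset.mem_sdiff, List.mem_toFinset, PySem.Set.mem_add] at this
      tauto

theorem ideal_nil (G : List (Int × List (List Int))) (e : List Int) : ideal G e [] = e := by
  rw [ideal]

theorem ideal_cons_mem (G : List (Int × List (List Int))) (e : List Int) (v : Int) (s : List Int)
    (h : v ∈ e) : ideal G e (v :: s) = ideal G e s := by
  rw [ideal]; simp [h]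

theorem ideal_cons_not_mem (G : List (Int × List (List Int))) (e : List Int) (v : Int) (s : List Int)
    (h : v ∉ e) : ideal G e (v :: s) = ideal G (PySem.Set.add e v) (nbrsOf G v ++ s) := by
  rw [ideal]; simp [h]

theorem ideal_append (G : List (Int × List (List Int))) (e : List Int) (s1 s2 : List Int) :
    ideal G e (s1 ++ s2) = ideal G (ideal G e s1) s2 := by
  induction e, s1 using ideal.induct G with
  | case1 e => rw [ideal_nil]; rfl
  | case2 e v s hv ih => rw [List.cons_append, ideal_cons_mem G _ _ _ hv, ideal_cons_mem G _ _ _ hv]; exact ih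
  | case3 e v s hv ih =>
    rw [List.cons_append, ideal_cons_not_mem G _ _ _ hv, ideal_cons_not_mem G _ _ _ hv, ← List.append_assoc]
    exact ih

theorem mem_ideal_of_mem (G : List (Int × List (List Int))) (e s : List Int) (x : Int)
    (hx : x ∈ e) : x ∈ ideal G e s := by
  induction e, s using ideal.induct G with
  | case1 e => rw [ideal_nil]; exact hx
  | case2 e v s hv ih => rw [ideal_cons_mem G _ _ _ hv]; exact ih hx
  | case3 e v s hv ih =>
    rw [ideal_cons_not_mem G _ _ _ hv]
    exact ih (by rw [PySem.Set.mem_add]; exact Or.inl hx)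

theorem cnt_mono (G : List (Int × List (List Int))) (e e' : List Int)
    (h : ∀ x, x ∈ e → x ∈ e') : cnt G e' ≤ cnt G e := by
  apply Finset.card_le_card
  intro x hx
  simp only [Finset.mem_filter] at *
  exact ⟨hx.1, fun hc => hx.2 (h x hc)⟩

theorem cnt_add_le (G : List (Int × List (List Int))) (e : List Int) (v : Int) :
    cnt G (PySem.Set.add e v) ≤ cnt G e :=
  cnt_mono G e _ (fun x hx => by rw [PySem.Set.mem_add]; exact Or.inl hx)

theorem cnt_add_lt (G : List (Int × List (List Int))) (e : List Int) (v : Int)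
    (hU : v ∈ (G.map Prod.fst).toFinset) (hv : v ∉ e) :
    cnt G (PySem.Set.add e v) < cnt G e := by
  apply Finset.card_lt_card
  constructor
  · intro x hx
    simp only [Finset.mem_filter, PySem.Set.mem_add] at *
    exact ⟨hx.1, fun hc => hx.2 (Or.inl hc)⟩
  · intro hcon
    have : v ∈ ((G.map Prod.fst).toFinset).filter (fun k => k ∉ e) := by
      simp only [Finset.mem_filter]; exact ⟨hU, hv⟩
    have := hcon this
    simp only [Finset.mem_filter, PySem.Set.mem_add] at this
    tauto

theorem cnt_ideal_le (G : List (Int × List (List Int))) (e s : List Int) :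
    cnt G (ideal G e s) ≤ cnt G e :=
  cnt_mono G e _ (mem_ideal_of_mem G e s)

-- B's while loop computes `ideal` when the fuel is large enough
theorem markB_eq_ideal (G : List (Int × List (List Int))) (f : Nat) :
    ∀ e s, s.length + cnt G e * (maxNbrLen G + 1) ≤ f → markB G f e s = ideal G e s := by
  induction f with
  | zero =>
    intro e s hf
    have : s = [] := by
      cases s with
      | nil => rfl
      | cons a s => simp at hf
    subst this; rw [ideal_nil, markB]
  | succ f ih =>
    intro e s hf
    cases s with
    | nil => rw [ideal_nil, markB]
    | cons v s =>
      by_cases hv : v ∈ e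
      · rw [markB, if_pos hv, ideal_cons_mem G _ _ _ hv]
        exact ih e s (by simp at hf; omega)
      · rw [markB, if_neg hv, ideal_cons_not_mem G _ _ _ hv]
        apply ih
        have h2 : (nbrsOf G v).length ≤ maxNbrLen G := nbrsOf_len_le G v
        rcases hg : (PySem.Dict.mk G).get? v with _ | val
        · have hnil := nbrsOf_of_none G v hg
          have h1 : cnt G (PySem.Set.add e v) ≤ cnt G e := cnt_add_le G e v
          have h3 : cnt G (PySem.Set.add e v) * (maxNbrLen G + 1) ≤ cnt G e * (maxNbrLen G + 1) :=
            Nat.mul_le_mul_right _ h1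
          rw [hnil]
          simp only [List.length_append, List.length_cons, List.length_nil] at hf ⊢
          omega
        · have h1 : cnt G (PySem.Set.add e v) < cnt G e :=
            cnt_add_lt G e v (mem_keys_of_get? G v val hg) hv
          have h3 : (cnt G (PySem.Set.add e v) + 1) * (maxNbrLen G + 1) ≤ cnt G e * (maxNbrLen G + 1) :=
            Nat.mul_le_mul_right _ h1
          simp only [List.length_append, List.length_cons] at hf ⊢
          nlinarith [hf, h1, h2, h3]

-- A's loop (with the recursive call) computes `ideal` too
theorem dfsALoop_ideal (G : List (Int × List (List Int))) (f : Nat) :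
    ∀ ws scc e, cnt G e + 1 ≤ f →
      (dfsALoop (dfsA G f) ws scc e).2 = ideal G e ws := by
  induction f using Nat.strong_induction_on with
  | _ f IHf =>
  intro ws
  induction ws with
  | nil => intro scc e _; rw [ideal_nil, dfsALoop]
  | cons w ws ih =>
    intro scc e hf
    by_cases hw : w ∈ e
    · rw [dfsALoop, if_pos hw, ideal_cons_mem G _ _ _ hw]
      exact ih scc e hf
    · rw [dfsALoop, if_neg hw, ideal_cons_not_mem G _ _ _ hw]
      obtain ⟨f', rfl⟩ : ∃ f', f = f' + 1 := ⟨f - 1, by omega⟩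
      have hrec : (dfsA G (f' + 1) w e).2 = ideal G (PySem.Set.add e w) (nbrsOf G w) := by
        rw [dfsA]
        rcases hg : (PySem.Dict.mk G).get? w with _ | val
        · rw [nbrsOf_of_none G w hg, dfsALoop, ideal_nil]
        · have hlt : cnt G (PySem.Set.add e w) < cnt G e :=
            cnt_add_lt G e w (mem_keys_of_get? G w val hg) hw
          exact IHf f' (by omega) (nbrsOf G w) [] (PySem.Set.add e w) (by omega)
      rw [hrec, ideal_append]
      exact ih (scc ++ [w]) _
        (by have h1 := cnt_ideal_le G (PySem.Set.add e w) (nbrsOf G w)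
            have h2 := cnt_add_le G e w
            omega)

theorem dfsA_snd (G : List (Int × List (List Int))) (f : Nat) (v : Int) (e : List Int)
    (hv : v ∉ e) (hf : cnt G e + 1 ≤ f) :
    (dfsA G f v e).2 = ideal G (PySem.Set.add e v) (nbrsOf G v) := by
  obtain ⟨f', rfl⟩ : ∃ f', f = f' + 1 := ⟨f - 1, by omega⟩
  rw [dfsA]
  rcases hg : (PySem.Dict.mk G).get? v with _ | val
  · rw [nbrsOf_of_none G v hg, dfsALoop, ideal_nil]
  · have hlt : cnt G (PySem.Set.add e v) < cnt G e :=
      cnt_add_lt G e v (mem_keys_of_get? G v val hg) hv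
    exact dfsALoop_ideal G f' (nbrsOf G v) [] (PySem.Set.add e v) (by omega)

-- the two outer loops agree (SCC and explored state) given enough fuel on both sides
theorem loop_eq (G : List (Int × List (List Int))) (fA fB : Nat) :
    ∀ ws scc e, cnt G e + 1 ≤ fA → cnt G e * (maxNbrLen G + 1) + 1 ≤ fB →
      dfsALoop (dfsA G fA) ws scc e = dfsBLoop G fB ws scc e := by
  intro ws
  induction ws with
  | nil => intro scc e _ _; rw [dfsALoop, dfsBLoop]
  | cons w ws ih =>
    intro scc e hfA hfB
    by_cases hw : w ∈ e
    · rw [dfsALoop, if_pos hw, dfsBLoop, if_pos hw]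
      exact ih scc e hfA hfB
    · rw [dfsALoop, if_neg hw, dfsBLoop, if_neg hw]
      have hA : (dfsA G fA w e).2 = ideal G (PySem.Set.add e w) (nbrsOf G w) :=
        dfsA_snd G fA w e hw hfA
      have hB : markB G fB e [w] = ideal G (PySem.Set.add e w) (nbrsOf G w) := by
        have := markB_eq_ideal G fB e [w]
          (by simp only [List.length_cons, List.length_nil]; omega)
        rw [this, ideal_cons_not_mem G _ _ _ hw, List.append_nil]
      rw [hA, hB]
      have hE1 : cnt G (ideal G (PySem.Set.add e w) (nbrsOf G w)) ≤ cnt G e :=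
        le_trans (cnt_ideal_le G _ _) (cnt_add_le G e w)
      apply ih
      · omega
      · have : cnt G (ideal G (PySem.Set.add e w) (nbrsOf G w)) * (maxNbrLen G + 1)
            ≤ cnt G e * (maxNbrLen G + 1) := Nat.mul_le_mul_right _ hE1
        omega

theorem cnt_le_len (G : List (Int × List (List Int))) (e : List Int) : cnt G e ≤ G.length := by
  calc cnt G e ≤ ((G.map Prod.fst).toFinset).card := Finset.card_le_card (Finset.filter_subset _ _)
    _ ≤ (G.map Prod.fst).length := List.toFinset_card_le _
    _ = G.length := List.length_map _

-- the two ports agree on EVERY input (the fuel values are always sufficient)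
theorem ports_equal (G : List (Int × List (List Int))) (start : Int) (explored : List Int) :
    dfs G start explored = dfs_alt G start explored := by
  unfold dfs dfs_alt
  rw [dfsA]
  have h1 : cnt G (PySem.Set.add explored start) + 1 ≤ G.length + 1 := by
    have := cnt_le_len G (PySem.Set.add explored start); omega
  have h2 : cnt G (PySem.Set.add explored start) * (maxNbrLen G + 1) + 1
      ≤ G.length * (maxNbrLen G + 1) + 1 := by
    have : cnt G (PySem.Set.add explored start) * (maxNbrLen G + 1)
        ≤ G.length * (maxNbrLen G + 1) :=
      Nat.mul_le_mul_right _ (cnt_le_len G _)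
    omega
  rw [loop_eq G (G.length + 1) (G.length * (maxNbrLen G + 1) + 1) (nbrsOf G start) []
    (PySem.Set.add explored start) h1 h2]

-- ===== VERDICT (by name: the statement is the Claim_ definition above) =====
theorem dfs_spec : Claim_equal_dfs :=
  fun G start explored _ _ => ports_equal G start explored
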